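-- pv_equiv track=rewrite | github.com/humbleman24/AcWing-and-leet | largenumber.py | multilpy
-- ===== SOURCE A (Python) =====
-- def multilpy(ln,b):
--     out = list()
--     t = 0
--     for i in range(len(ln)):
--         t += b * ln[i]
--         out.append(t%10)
--         t //= 10
--     while t != 0:
--         out.append(t%10)
--         t //= 10
--     while len(out)>1 and out[-1] == 0:
--         out.pop(-1)
--     return out
-- ===== SOURCE B (Python) =====
-- def multilpy(ln, b):
--     if not ln:
--         return []
--     num = 0
--     for d in reversed(ln):
--         num = d + 10 * num
--     ds = []
--     p = num * b
--     while p != 0: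
--         ds.append(p % 10)
--         p //= 10
--     return ds if ds else [0]
-- ===== Notes on version B (the rewrite author's own statement) =====
-- stated objective: simpler
-- what changed: B collapses the digit array to one integer, multiplies once using Python big-int arithmetic, and re-extracts the digits of the product, replacing A's interleaved per-digit carry loop plus trailing-zero stripping pass.
import Mathlib
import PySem

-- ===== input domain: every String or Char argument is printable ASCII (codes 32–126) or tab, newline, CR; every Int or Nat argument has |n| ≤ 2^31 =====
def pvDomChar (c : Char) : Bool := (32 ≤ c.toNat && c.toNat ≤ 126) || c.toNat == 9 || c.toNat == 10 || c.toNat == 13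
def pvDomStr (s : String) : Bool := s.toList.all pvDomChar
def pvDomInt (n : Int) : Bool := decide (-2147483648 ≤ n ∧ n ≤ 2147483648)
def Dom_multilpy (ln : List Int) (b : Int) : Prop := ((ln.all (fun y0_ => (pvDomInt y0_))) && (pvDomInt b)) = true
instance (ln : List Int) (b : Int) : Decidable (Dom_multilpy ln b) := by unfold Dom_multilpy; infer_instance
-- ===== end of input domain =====

-- B replaces A's interleaved per-digit carry loop (plus trailing-zero stripping) by one
-- big-int multiplication followed by digit re-extraction (objective: simpler).
-- Both Pythons diverge when the product is negative; Pre_ excludes exactly those inputs.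

-- ===== PORT A =====
-- Python's 'while t != 0: append(t%10); t //= 10': for t < 0 the Python loop never
-- terminates (t //= 10 stabilises at -1), so the port recurses only while 0 < t;
-- it is exact for t ≥ 0, and t < 0 is excluded by Pre_multilpy.
def pvCarry (t : Int) : List Int :=
  if 0 < t then
    PySem.Int.mod t 10 :: pvCarry (PySem.Int.floordiv t 10)
  else []
termination_by t.toNat
decreasing_by
  have h1 : PySem.Int.floordiv t 10 = t / 10 := PySem.Int.floordiv_eq_ediv_of_pos (by omega)
  rw [h1]; omega

-- Python's 'while len(out)>1 and out[-1]==0: out.pop(-1)' (out[-1] on a list of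
-- length > 1 is its last element; pop(-1) is dropLast).
def pvStrip (out : List Int) : List Int :=
  if out.length > 1 ∧ out.getLast? = some 0 then pvStrip out.dropLast else out
termination_by out.length
decreasing_by
  rename_i h; simp [List.length_dropLast]; omega

def multilpy (ln : List Int) (b : Int) : List Int :=
  -- for i in range(len(ln)): t += b*ln[i]; out.append(t%10); t //= 10
  let s := ln.foldl (fun (s : List Int × Int) d =>
    let t := s.2 + b * d
    (s.1 ++ [PySem.Int.mod t 10], PySem.Int.floordiv t 10)) (([] : List Int), (0 : Int))
  pvStrip (s.1 ++ pvCarry s.2)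

-- ===== PORT B =====
-- 'while p != 0: ds.append(p%10); p //= 10' — same while-loop shape as A's overflow
-- loop, shared as pvCarry (exact for p ≥ 0; p < 0 diverges in Python, outside Pre_).
def multilpy_alt (ln : List Int) (b : Int) : List Int :=
  if ln = [] then []
  else
    -- for d in reversed(ln): num = d + 10*num
    let num := ln.foldr (fun d acc => d + 10 * acc) 0
    let ds := pvCarry (num * b)
    if ds = [] then [0] else ds

-- ===== PRECONDITION & SPEC =====
-- the little-endian value of the digit list (a function of the input only)
def pvVal (ln : List Int) : Int := ln.foldr (fun d acc => d + 10 * acc) 0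

-- Pre_ excludes exactly the inputs where the product b * value(ln) is negative:
-- there Python A's 'while t != 0: t //= 10' loop never terminates (and B's
-- extraction loop likewise), so A returns on precisely these inputs.
def Pre_multilpy (ln : List Int) (b : Int) : Prop := 0 ≤ b * pvVal ln
instance (ln : List Int) (b : Int) : Decidable (Pre_multilpy ln b) := by
  unfold Pre_multilpy; infer_instance

def pvWitness_multilpy : List Int × Int := ([3, 2, 1], 7)

def Spec_multilpy (ln : List Int) (b : Int) (out : List Int) : Prop := out = multilpy_alt ln b
instance (ln : List Int) (b : Int) (out : List Int) : Decidable (Spec_multilpy ln b out) := by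
  unfold Spec_multilpy; infer_instance

-- ===== CLAIM (what is proved, stated in full; the proofs are below) =====
def Claim_equal_multilpy : Prop := ∀ (ln : List Int) (b : Int), Dom_multilpy ln b → Pre_multilpy ln b → Spec_multilpy ln b (multilpy ln b)

-- ===== LEMMAS AND PROOFS =====

theorem pvWitness_ok :
    Dom_multilpy pvWitness_multilpy.1 pvWitness_multilpy.2 ∧
    Pre_multilpy pvWitness_multilpy.1 pvWitness_multilpy.2 := by decide

-- the full (unstripped) list A builds, as a recursion over the digits
def pvG (b t : Int) : List Int → List Int
  | [] => pvCarry t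
  | d :: ds => PySem.Int.mod (t + b * d) 10 :: pvG b (PySem.Int.floordiv (t + b * d) 10) ds

-- n low digits of t, then pvCarry of the rest
def pvCdig (t : Int) : Nat → List Int
  | 0 => pvCarry t
  | n + 1 => PySem.Int.mod t 10 :: pvCdig (PySem.Int.floordiv t 10) n

theorem foldA_eq (b : Int) (ds : List Int) : ∀ (acc : List Int) (t : Int),
    (List.foldl (fun (s : List Int × Int) d =>
      let t := s.2 + b * d
      (s.1 ++ [PySem.Int.mod t 10], PySem.Int.floordiv t 10)) (acc, t) ds).1 ++
    pvCarry (List.foldl (fun (s : List Int × Int) d =>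
      let t := s.2 + b * d
      (s.1 ++ [PySem.Int.mod t 10], PySem.Int.floordiv t 10)) (acc, t) ds).2
    = acc ++ pvG b t ds := by
  induction ds with
  | nil => intro acc t; simp [pvG]
  | cons d ds ih =>
    intro acc t
    simp only [List.foldl_cons, pvG]
    rw [ih]
    simp

theorem mod10 (t : Int) : PySem.Int.mod t 10 = t % 10 :=
  PySem.Int.mod_eq_emod_of_pos (by omega)

theorem div10 (t : Int) : PySem.Int.floordiv t 10 = t / 10 :=
  PySem.Int.floordiv_eq_ediv_of_pos (by omega)

theorem pvG_eq_cdig (b : Int) (ds : List Int) : ∀ t : Int,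
    pvG b t ds = pvCdig (t + b * pvVal ds) ds.length := by
  induction ds with
  | nil => intro t; simp [pvG, pvCdig, pvVal]
  | cons d ds ih =>
    intro t
    have hv : pvVal (d :: ds) = d + 10 * pvVal ds := rfl
    simp only [pvG, pvCdig, List.length_cons, ih, hv, mod10, div10]
    have he : t + b * (d + 10 * pvVal ds) = (t + b * d) + 10 * (b * pvVal ds) := by ring
    rw [he]
    generalize t + b * d = m
    generalize b * pvVal ds = k
    congr 1
    · omega
    · congr 1; omega

theorem pvCarry_zero : pvCarry 0 = [] := by rw [pvCarry]; simp

theorem pvCarry_pos (t : Int) (ht : 0 < t) :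
    pvCarry t = t % 10 :: pvCarry (t / 10) := by
  rw [pvCarry, if_pos ht, mod10, div10]

theorem pvCarry_ne_nil (t : Int) (ht : 0 < t) : pvCarry t ≠ [] := by
  rw [pvCarry_pos t ht]; simp

theorem getLast?_cons_ne_nil (a : Int) (l : List Int) (h : l ≠ []) :
    (a :: l).getLast? = l.getLast? := by
  cases l with
  | nil => exact absurd rfl h
  | cons x xs => rfl

theorem pvCarry_getLast?_ne_zero : ∀ t : Int, 0 < t → (pvCarry t).getLast? ≠ some 0 := by
  intro t
  induction t using pvCarry.induct with
  | case1 t h ih =>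
    intro _
    rw [pvCarry_pos t h]
    by_cases h10 : t < 10
    · have h0 : t / 10 = 0 := by omega
      rw [h0, pvCarry_zero]
      simp
      omega
    · have hpos : 0 < t / 10 := by omega
      rw [getLast?_cons_ne_nil _ _ (pvCarry_ne_nil _ hpos)]
      have := ih (by rw [div10]; exact hpos)
      rw [div10] at this
      exact this
  | case2 t h => intro ht; omega

theorem pvCdig_eq : ∀ (n : Nat) (t : Int), 0 ≤ t →
    pvCdig t n = pvCarry t ++ List.replicate (n - (pvCarry t).length) 0 := by
  intro n
  induction n with
  | zero => intro t ht; simp [pvCdig]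
  | succ n ih =>
    intro t ht
    simp only [pvCdig, mod10, div10]
    rcases eq_or_lt_of_le ht with h0 | hpos
    · rw [← h0, pvCarry_zero, show (0:Int) % 10 = 0 by decide,
        show (0:Int) / 10 = 0 by decide, ih 0 le_rfl, pvCarry_zero]
      simp [List.replicate_succ]
    · rw [pvCarry_pos t hpos, ih (t / 10) (by omega)]
      simp [Nat.succ_sub_succ]

theorem pvStrip_replicate : ∀ (n : Nat), 1 ≤ n →
    pvStrip (List.replicate n (0 : Int)) = [0] := by
  intro n
  induction n with
  | zero => omega
  | succ n ih =>
    intro _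
    rcases Nat.eq_zero_or_pos n with h0 | hpos
    · subst h0; rw [pvStrip]; simp
    · rw [pvStrip]
      have hcond : (List.replicate (n + 1) (0 : Int)).length > 1 ∧
          (List.replicate (n + 1) (0 : Int)).getLast? = some 0 := by
        constructor
        · simp; omega
        · rw [List.getLast?_replicate]; simp
      rw [if_pos hcond, List.dropLast_replicate]
      simpa using ih hpos

theorem pvStrip_append_zeros (l : List Int) (hl : l ≠ []) (hlast : l.getLast? ≠ some 0) :
    ∀ k, pvStrip (l ++ List.replicate k 0) = l := by
  intro k
  induction k with
  | zero =>
    simp only [List.replicate, List.append_nil]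
    rw [pvStrip]
    exact if_neg (fun hc => hlast hc.2)
  | succ k ih =>
    have hsplit : l ++ List.replicate (k + 1) (0 : Int) = (l ++ List.replicate k 0) ++ [0] := by
      rw [List.replicate_succ', ← List.append_assoc]
    rw [pvStrip, hsplit]
    have hcond : ((l ++ List.replicate k (0 : Int)) ++ [0]).length > 1 ∧
        ((l ++ List.replicate k (0 : Int)) ++ [0]).getLast? = some 0 := by
      constructor
      · have : 1 ≤ l.length := List.length_pos_iff.mpr hl
        simp; omega
      · simp
    rw [if_pos hcond, List.dropLast_concat]
    exact ih

-- ===== VERDICT (by name: the statement is the Claim_ definition above) =====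
theorem multilpy_spec : Claim_equal_multilpy := by
  intro ln b _hdom hpre
  unfold Spec_multilpy multilpy multilpy_alt
  simp only []
  have hfold := foldA_eq b ln [] 0
  rw [hfold, List.nil_append, pvG_eq_cdig, zero_add]
  unfold Pre_multilpy at hpre
  cases ln with
  | nil =>
    have : pvVal ([] : List Int) = 0 := rfl
    rw [this, mul_zero]
    simp [pvCdig, pvCarry_zero, pvStrip]
  | cons d ds =>
    have hne : (d :: ds : List Int) ≠ [] := by simp
    rw [if_neg hne]
    have hval : (d :: ds).foldr (fun d acc => d + 10 * acc) 0 = pvVal (d :: ds) := rfl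
    rw [hval, mul_comm (pvVal (d :: ds)) b]
    set P := b * pvVal (d :: ds) with hP
    rw [pvCdig_eq _ P hpre]
    rcases eq_or_lt_of_le hpre with h0 | hpos
    · rw [← h0, pvCarry_zero]
      simp only [List.nil_append, List.length_nil, Nat.sub_zero, List.length_cons]
      exact pvStrip_replicate _ (by omega)
    · rw [pvStrip_append_zeros (pvCarry P) (pvCarry_ne_nil P hpos)
        (pvCarry_getLast?_ne_zero P hpos)]
      rw [if_neg (pvCarry_ne_nil P hpos)]
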